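-- pv_equiv track=rewrite | github.com/floatingCatty/Hubbard | gGA/model/operators.py | generate_basis
-- ===== SOURCE A (Python) =====
-- def generate_basis(norb, nocc):
--     state_labels = [0, 1, 2, 3]
--     state_electrons = {0: 0, 1: 1, 2: 1, 3: 2}
--     basis_states = []
--
--     stack = []
--     # Initialize the stack with the starting state
--     # We use a tuple (orbital_index, current_config, current_electrons)
--     stack.append((0, [], 0))
--
--     while stack:
--         orbital_index, current_config, current_electrons = stack.pop()
--
--         # Early pruning: if the minimum possible electrons from here exceed nocc, skip
--         remaining_orbitals = norb - orbital_index
--         min_possible_electrons = current_electrons + remaining_orbitals * min(state_electrons.values())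
--         max_possible_electrons = current_electrons + remaining_orbitals * max(state_electrons.values())
--
--         if min_possible_electrons > nocc or max_possible_electrons < nocc:
--             continue  # Prune branches that can't possibly sum to nocc
--
--         if orbital_index == norb:
--             if current_electrons == nocc:
--                 basis_states.append(list(current_config))  # Use tuple for efficiency
--             continue
--
--         for state in state_labels:
--             electrons = state_electrons[state]
--             new_total = current_electrons + electrons
--
--             if new_total > nocc:
--                 continue  # Prune branches exceeding electron count
--
--             # Instead of copying the list, we pass the new element separately
--             stack.append((orbital_index + 1, current_config + [state], new_total))
--
--     return basis_states
-- ===== SOURCE B (Python) =====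
-- ELEC = {0: 0, 1: 1, 2: 1, 3: 2}
--
--
-- def generate_basis(norb, nocc):
--     if norb < 0:
--         return []
--
--     def rec(remaining, cfg, e):
--         # feasibility pruning: even filling every remaining orbital with 2
--         # electrons cannot reach nocc
--         if e + 2 * remaining < nocc:
--             return []
--         if remaining == 0:
--             return [cfg] if e == nocc else []
--         out = []
--         # descending state order reproduces the LIFO pop order of A's stack
--         for s in (3, 2, 1, 0):
--             ne = e + ELEC[s]
--             if ne <= nocc:
--                 out += rec(remaining - 1, cfg + [s], ne)
--         return out
--
--     return rec(norb, [], 0)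
-- ===== Notes on version B (the rewrite author's own statement) =====
-- stated objective: simpler
-- what changed: Replaced A's explicit LIFO worklist (a stack of (orbital_index, config, electrons) tuples popped in a while-loop, re-deriving min/max per-orbital electron counts from the dict on every pop) by a direct recursive enumeration over the remaining orbitals that visits states in descending order to reproduce the stack's pop order, keeping the same feasibility pruning.
import Mathlib
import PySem

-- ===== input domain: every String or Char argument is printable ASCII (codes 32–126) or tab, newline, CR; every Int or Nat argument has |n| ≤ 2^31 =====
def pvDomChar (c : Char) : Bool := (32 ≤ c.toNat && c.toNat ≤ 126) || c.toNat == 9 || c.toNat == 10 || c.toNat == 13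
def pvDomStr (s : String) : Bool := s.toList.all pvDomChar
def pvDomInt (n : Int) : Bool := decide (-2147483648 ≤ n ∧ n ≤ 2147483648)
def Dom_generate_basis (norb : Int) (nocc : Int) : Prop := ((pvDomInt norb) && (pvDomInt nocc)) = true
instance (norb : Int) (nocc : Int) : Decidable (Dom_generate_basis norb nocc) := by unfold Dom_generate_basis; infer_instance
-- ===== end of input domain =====

-- B replaces A's explicit LIFO stack machine by a direct recursion over the orbitals
-- (states visited in descending order to reproduce the stack's pop order): simpler.

-- ===== PORT A =====

-- state_electrons = {0: 0, 1: 1, 2: 1, 3: 2}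
def pvStateElectrons : PySem.Dict Int Int := PySem.Dict.ofList [(0, 0), (1, 1), (2, 1), (3, 2)]

-- weight of a stack entry / of the stack, used only to justify termination of A's while-loop
def pvWgt (norb : Int) (ent : Int × List Int × Int) : Nat := 5 ^ (norb + 1 - ent.1).toNat
def pvSwgt (norb : Int) (st : List (Int × List Int × Int)) : Nat := (st.map (pvWgt norb)).sum

-- termination measure facts for A's while-loop (cited by name in decreasing_by)
lemma pvALoop_dec1 (norb : Int) (ent : Int × List Int × Int) (rest : List (Int × List Int × Int)) :
    pvSwgt norb rest < pvSwgt norb (ent :: rest) := by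
  have hw : 0 < pvWgt norb ent := pow_pos (by norm_num) _
  simp only [pvSwgt, List.map_cons, List.sum_cons]
  omega

lemma pvALoop_dec2 (norb nocc orbitalIndex currentElectrons : Int) (currentConfig : List Int)
    (rest : List (Int × List Int × Int))
    (h1 : ¬(currentElectrons + (norb - orbitalIndex) * ((PySem.List.min? pvStateElectrons.values (fun x => x)).getD 0) > nocc
        ∨ currentElectrons + (norb - orbitalIndex) * ((PySem.List.max? pvStateElectrons.values (fun x => x)).getD 0) < nocc))
    (h2 : ¬ orbitalIndex = norb) :
    pvSwgt norb (List.foldl (fun stk s =>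
        let electrons := (pvStateElectrons.get? s).getD 0
        let newTotal := currentElectrons + electrons
        if newTotal > nocc then stk
        else (orbitalIndex + 1, currentConfig ++ [s], newTotal) :: stk) rest [0, 1, 2, 3])
      < pvSwgt norb ((orbitalIndex, currentConfig, currentElectrons) :: rest) := by
  have hmin : ((PySem.List.min? pvStateElectrons.values (fun x => x)).getD 0) = (0 : Int) := by decide
  have hmax : ((PySem.List.max? pvStateElectrons.values (fun x => x)).getD 0) = (2 : Int) := by decide
  rw [hmin, hmax] at h1
  push_neg at h1
  have hlt : orbitalIndex < norb := by
    rcases h1 with ⟨hA, hB⟩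
    omega
  have hk : (norb + 1 - orbitalIndex).toNat = (norb + 1 - (orbitalIndex + 1)).toNat + 1 := by omega
  have hw2 : 0 < 5 ^ (norb + 1 - (orbitalIndex + 1)).toNat := pow_pos (by norm_num) _
  simp only [List.foldl]
  split_ifs <;>
    simp only [pvSwgt, List.map_cons, List.sum_cons, pvWgt, hk, pow_succ] <;> omega

-- the while-loop of A; the stack is a list with its head as top (append/pop at the head)
def pvALoop (norb : Int) (nocc : Int) (st : List (Int × List Int × Int))
    (basis : List (List Int)) : List (List Int) :=
  match st with
  | [] => basis
  | (orbitalIndex, currentConfig, currentElectrons) :: rest =>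
    let remaining := norb - orbitalIndex
    -- min(state_electrons.values()) / max(state_electrons.values()) on the literal dict
    let minPossible := currentElectrons + remaining * ((PySem.List.min? pvStateElectrons.values (fun x => x)).getD 0)
    let maxPossible := currentElectrons + remaining * ((PySem.List.max? pvStateElectrons.values (fun x => x)).getD 0)
    if minPossible > nocc ∨ maxPossible < nocc then
      pvALoop norb nocc rest basis
    else if orbitalIndex = norb then
      pvALoop norb nocc rest (if currentElectrons = nocc then basis ++ [currentConfig] else basis)
    else
      pvALoop norb nocc
        (List.foldl (fun stk s =>
            let electrons := (pvStateElectrons.get? s).getD 0   -- keys cover all four states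
            let newTotal := currentElectrons + electrons
            if newTotal > nocc then stk
            else (orbitalIndex + 1, currentConfig ++ [s], newTotal) :: stk)
          rest [0, 1, 2, 3]) basis
  termination_by pvSwgt norb st
  decreasing_by
  · exact pvALoop_dec1 norb _ rest
  · exact pvALoop_dec1 norb _ rest
  · rename_i h1 h2
    exact pvALoop_dec2 norb nocc orbitalIndex currentElectrons currentConfig rest h1 h2

def generate_basis (norb : Int) (nocc : Int) : List (List Int) :=
  pvALoop norb nocc [(0, [], 0)] []

-- ===== PORT B =====

-- ELEC = {0: 0, 1: 1, 2: 1, 3: 2}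
def pvElec (s : Int) : Int := ((PySem.Dict.ofList [((0:Int), (0:Int)), (1, 1), (2, 1), (3, 2)]).get? s).getD 0

def pvBRec (nocc : Int) : Nat → List Int → Int → List (List Int)
  | remaining, cfg, e =>
    if e + 2 * (remaining : Int) < nocc then []   -- feasibility pruning
    else
      match remaining with
      | 0 => if e = nocc then [cfg] else []
      | Nat.succ r =>
        List.foldl (fun out s =>
            let ne := e + pvElec s
            if ne ≤ nocc then out ++ pvBRec nocc r (cfg ++ [s]) ne else out)
          [] [3, 2, 1, 0]

def generate_basis_alt (norb : Int) (nocc : Int) : List (List Int) :=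
  if norb < 0 then [] else pvBRec nocc norb.toNat [] 0

-- ===== PRECONDITION & SPEC =====
def Spec_generate_basis (norb : Int) (nocc : Int) (out : List (List Int)) : Prop := out = generate_basis_alt norb nocc
instance (norb : Int) (nocc : Int) (out : List (List Int)) : Decidable (Spec_generate_basis norb nocc out) := by unfold Spec_generate_basis; infer_instance

-- ===== CLAIM (what is proved, stated in full; the proofs are below) =====
def Claim_equal_generate_basis : Prop := ∀ (norb : Int) (nocc : Int), Dom_generate_basis norb nocc → Spec_generate_basis norb nocc (generate_basis norb nocc)

-- ===== LEMMAS AND PROOFS =====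

-- interpretation of one stack entry as the sub-basis B's recursion produces for it
def pvG (norb : Int) (nocc : Int) (ent : Int × List Int × Int) : List (List Int) :=
  if nocc < ent.2.2 then [] else pvBRec nocc (norb - ent.1).toNat ent.2.1 ent.2.2

lemma pvElec3 : pvElec 3 = 2 := by decide
lemma pvElec2 : pvElec 2 = 1 := by decide
lemma pvElec1 : pvElec 1 = 1 := by decide
lemma pvElec0 : pvElec 0 = 0 := by decide

lemma pvBRec_gt (nocc : Int) (n : Nat) (cfg : List Int) (e : Int) (h : nocc < e) :
    pvBRec nocc n cfg e = [] := by
  cases n with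
  | zero =>
    simp only [pvBRec]
    split_ifs <;> first | rfl | omega
  | succ r =>
    simp only [pvBRec, List.foldl, pvElec3, pvElec2, pvElec1, pvElec0]
    split_ifs <;> first | rfl | omega

lemma pvG_mk (norb nocc i e : Int) (cfg : List Int) :
    pvG norb nocc (i, cfg, e) = if nocc < e then [] else pvBRec nocc (norb - i).toNat cfg e := rfl

lemma pvBRec_prune (nocc : Int) (n : Nat) (cfg : List Int) (e : Int)
    (h : e + 2 * (n : Int) < nocc) : pvBRec nocc n cfg e = [] := by
  cases n <;> simp only [pvBRec] <;> rw [if_pos (by omega)]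

lemma flatten_map_if' {α β : Type} (g : α → List β) (c : Prop) [inst : Decidable c] (x : α) (st : List α) :
    (List.map g (if c then st else x :: st)).flatten
      = (if c then [] else g x) ++ (List.map g st).flatten := by
  split_ifs <;> simp

lemma pvG_step (norb nocc oi e : Int) (cfg : List Int) (hi : oi < norb) (hle : e ≤ nocc) :
    pvG norb nocc (oi, cfg, e)
      = (if e + 2 > nocc then [] else pvG norb nocc (oi + 1, cfg ++ [3], e + 2))
        ++ ((if e + 1 > nocc then [] else pvG norb nocc (oi + 1, cfg ++ [2], e + 1))
        ++ ((if e + 1 > nocc then [] else pvG norb nocc (oi + 1, cfg ++ [1], e + 1))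
        ++ ((if e + 0 > nocc then [] else pvG norb nocc (oi + 1, cfg ++ [0], e + 0)) ++ []))) := by
  have hr : (norb - oi).toNat = (norb - (oi + 1)).toNat + 1 := by omega
  by_cases hpr : e + 2 * (norb - oi) < nocc
  · have hL : pvG norb nocc (oi, cfg, e) = [] := by
      rw [pvG_mk, if_neg (by omega)]
      exact pvBRec_prune _ _ _ _ (by omega)
    have hP : ∀ d s : Int, 0 ≤ d → d ≤ 2 → pvG norb nocc (oi + 1, cfg ++ [s], e + d) = [] := by
      intro d s hd0 hd2
      rw [pvG_mk]
      split_ifs with hcond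
      · rfl
      · exact pvBRec_prune _ _ _ _ (by omega)
    rw [hL, hP 2 3 (by norm_num) (by norm_num), hP 1 2 (by norm_num) (by norm_num),
      hP 1 1 (by norm_num) (by norm_num), hP 0 0 (by norm_num) (by norm_num)]
    simp
  · simp only [pvG_mk]
    rw [if_neg (by omega), hr]
    simp only [pvBRec, List.foldl_cons, List.foldl_nil, pvElec3, pvElec2, pvElec1, pvElec0]
    rw [if_neg (by omega)]
    split_ifs <;> first | (exfalso; omega) | (simp [List.append_assoc])

lemma pvALoop_inv (norb nocc : Int) (st : List (Int × List Int × Int)) (basis : List (List Int))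
    (h : ∀ ent ∈ st, ent.1 ≤ norb) :
    pvALoop norb nocc st basis = basis ++ (st.map (pvG norb nocc)).flatten := by
  revert h
  induction st, basis using pvALoop.induct norb nocc with
  | case1 basis => intro _; simp [pvALoop]
  | case2 basis orbitalIndex currentConfig currentElectrons rest remaining minPossible maxPossible hpr ih =>
    intro h
    have hmin : ((PySem.List.min? pvStateElectrons.values (fun x => x)).getD 0) = (0 : Int) := by decide
    have hmax : ((PySem.List.max? pvStateElectrons.values (fun x => x)).getD 0) = (2 : Int) := by decide
    have hi : orbitalIndex ≤ norb := h (orbitalIndex, currentConfig, currentElectrons) (by simp)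
    have hrest : ∀ ent ∈ rest, ent.1 ≤ norb := fun ent hm => h ent (by simp [hm])
    rw [pvALoop]
    rw [if_pos hpr, ih hrest]
    have hpr' : currentElectrons + (norb - orbitalIndex) * ((PySem.List.min? pvStateElectrons.values (fun x => x)).getD 0) > nocc
        ∨ currentElectrons + (norb - orbitalIndex) * ((PySem.List.max? pvStateElectrons.values (fun x => x)).getD 0) < nocc := hpr
    rw [hmin, hmax] at hpr'
    have hg : pvG norb nocc (orbitalIndex, currentConfig, currentElectrons) = [] := by
      unfold pvG
      rcases hpr' with hp | hp
      · rw [if_pos (by simp only; omega)]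
      · rw [if_neg (by simp only; omega)]
        rcases hn : (norb - orbitalIndex).toNat with _ | r <;>
          simp only [pvBRec] <;> rw [if_pos (by omega)]
    simp [hg]
  | case3 basis currentConfig currentElectrons rest remaining minPossible maxPossible hpr ih =>
    intro h
    have hmin : ((PySem.List.min? pvStateElectrons.values (fun x => x)).getD 0) = (0 : Int) := by decide
    have hmax : ((PySem.List.max? pvStateElectrons.values (fun x => x)).getD 0) = (2 : Int) := by decide
    have hpr' : ¬(currentElectrons + (norb - norb) * ((PySem.List.min? pvStateElectrons.values (fun x => x)).getD 0) > nocc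
        ∨ currentElectrons + (norb - norb) * ((PySem.List.max? pvStateElectrons.values (fun x => x)).getD 0) < nocc) := hpr
    rw [hmin, hmax] at hpr'
    push_neg at hpr'
    have he : currentElectrons = nocc := by
      have hA := hpr'.1; have hB := hpr'.2; omega
    have hrest : ∀ ent ∈ rest, ent.1 ≤ norb := fun ent hm => h ent (by simp [hm])
    rw [pvALoop]
    rw [if_neg hpr, if_pos rfl, if_pos he]
    rw [dif_pos he] at ih
    rw [ih hrest]
    have hg : pvG norb nocc (norb, currentConfig, currentElectrons) = [currentConfig] := by
      unfold pvG
      rw [if_neg (by simp only; omega)]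
      simp only [sub_self, Int.toNat_zero]
      simp only [pvBRec]
      rw [if_neg (by omega), if_pos he]
    simp [hg]
  | case4 basis orbitalIndex currentConfig currentElectrons rest remaining minPossible maxPossible hpr hne ih =>
    intro h
    have hpr' : ¬(currentElectrons + (norb - orbitalIndex) * ((PySem.List.min? pvStateElectrons.values (fun x => x)).getD 0) > nocc
        ∨ currentElectrons + (norb - orbitalIndex) * ((PySem.List.max? pvStateElectrons.values (fun x => x)).getD 0) < nocc) := hpr
    have hmin : ((PySem.List.min? pvStateElectrons.values (fun x => x)).getD 0) = (0 : Int) := by decide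
    have hmax : ((PySem.List.max? pvStateElectrons.values (fun x => x)).getD 0) = (2 : Int) := by decide
    rw [hmin, hmax] at hpr'
    push_neg at hpr'
    have hi : orbitalIndex < norb := by
      have hA := hpr'.1; have hB := hpr'.2
      have hC : orbitalIndex ≠ norb := hne
      by_contra hc; push_neg at hc; omega
    have hrest : ∀ ent ∈ rest, ent.1 ≤ norb := fun ent hm => h ent (by simp [hm])
    rw [pvALoop]
    rw [if_neg hpr, if_neg hne]
    have hstk : ∀ ent ∈ List.foldl (fun stk s =>
        let electrons := (pvStateElectrons.get? s).getD 0
        let newTotal := currentElectrons + electrons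
        if newTotal > nocc then stk
        else (orbitalIndex + 1, currentConfig ++ [s], newTotal) :: stk) rest [0, 1, 2, 3],
        ent.1 ≤ norb := by
      have hrest : ∀ ent ∈ rest, ent.1 ≤ norb := fun ent hm => h ent (by simp [hm])
      have key : ∀ (l : List Int) (st : List (Int × List Int × Int)),
          (∀ ent ∈ st, ent.1 ≤ norb) →
          ∀ ent ∈ List.foldl (fun stk s =>
              let electrons := (pvStateElectrons.get? s).getD 0
              let newTotal := currentElectrons + electrons
              if newTotal > nocc then stk
              else (orbitalIndex + 1, currentConfig ++ [s], newTotal) :: stk) st l,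
            ent.1 ≤ norb := by
        intro l
        induction l with
        | nil => intro st hst ent hm; exact hst ent hm
        | cons s l ihl =>
          intro st hst ent hm
          simp only [List.foldl_cons] at hm
          refine ihl _ ?_ ent hm
          intro ent' hm'
          split_ifs at hm'
          · exact hst ent' hm'
          · rcases List.mem_cons.mp hm' with rfl | hm''
            · simp only
              omega
            · exact hst ent' hm''
      exact key [0, 1, 2, 3] rest hrest
    simp only [dite_eq_ite] at ih
    rw [ih hstk]
    simp only [List.foldl_cons, List.foldl_nil]
    have hget3 : ((pvStateElectrons.get? 3).getD 0) = (2 : Int) := by decide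
    have hget2 : ((pvStateElectrons.get? 2).getD 0) = (1 : Int) := by decide
    have hget1 : ((pvStateElectrons.get? 1).getD 0) = (1 : Int) := by decide
    have hget0 : ((pvStateElectrons.get? 0).getD 0) = (0 : Int) := by decide
    simp only [hget3, hget2, hget1, hget0]
    rw [flatten_map_if', flatten_map_if', flatten_map_if', flatten_map_if']
    simp only [List.map_cons, List.flatten_cons]
    rw [pvG_step norb nocc orbitalIndex currentElectrons currentConfig hi (by have := hpr'.1; omega)]
    simp [List.append_assoc]

-- ===== VERDICT (by name: the statement is the Claim_ definition above) =====
theorem generate_basis_spec : Claim_equal_generate_basis := by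
  unfold Claim_equal_generate_basis
  intro norb nocc _
  unfold Spec_generate_basis generate_basis generate_basis_alt
  by_cases hn : norb < 0
  · rw [if_pos hn, pvALoop]
    have hmin : ((PySem.List.min? pvStateElectrons.values (fun x => x)).getD 0) = (0 : Int) := by decide
    have hmax : ((PySem.List.max? pvStateElectrons.values (fun x => x)).getD 0) = (2 : Int) := by decide
    have hc : (0 : Int) + (norb - 0) * ((PySem.List.min? pvStateElectrons.values (fun x => x)).getD 0) > nocc
        ∨ (0 : Int) + (norb - 0) * ((PySem.List.max? pvStateElectrons.values (fun x => x)).getD 0) < nocc := by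
      rw [hmin, hmax]; omega
    rw [if_pos hc, pvALoop]
  · push_neg at hn
    rw [if_neg (by omega)]
    rw [pvALoop_inv norb nocc [(0, [], 0)] []
      (by intro ent hm; simp only [List.mem_singleton] at hm; subst hm; simpa using hn)]
    simp only [List.map_cons, List.map_nil, List.flatten_cons, List.flatten_nil,
      List.nil_append, List.append_nil]
    unfold pvG
    by_cases h0 : nocc < 0
    · rw [if_pos (by simpa using h0)]
      exact (pvBRec_gt nocc norb.toNat [] 0 h0).symm
    · rw [if_neg (by simpa using h0)]
      simp only [sub_zero]
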